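-- pv_equiv track=rewrite | github.com/luisevonderwiese/alpha_mystery | util.py | is_invariant
-- ===== SOURCE A (Python) =====
-- def is_invariant(site):
--     i = 0
--     v0 = None
--     while (v0 is None and i < len(site)):
--         if site[i] != "-":
--             v0 = site[i]
--         i+=1
--     if v0 is None:
--         return True
--     for j in range(i, len(site)):
--         if site[j] == "-":
--             continue
--         if site[j] != v0:
--             return False
--     return True
-- ===== SOURCE B (Python) =====
-- def is_invariant(site):
--     distinct = set(c for c in site if c != "-")
--     return len(distinct) <= 1
-- ===== Notes on version B (the rewrite author's own statement) =====
-- stated objective: simpler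
-- what changed: Replaces the two-phase sentinel loop (find first non-dash anchor, then compare the rest with early exit) by a single collect-then-count pass: build the set of distinct non-dash characters and test its cardinality <= 1.
import Mathlib
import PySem

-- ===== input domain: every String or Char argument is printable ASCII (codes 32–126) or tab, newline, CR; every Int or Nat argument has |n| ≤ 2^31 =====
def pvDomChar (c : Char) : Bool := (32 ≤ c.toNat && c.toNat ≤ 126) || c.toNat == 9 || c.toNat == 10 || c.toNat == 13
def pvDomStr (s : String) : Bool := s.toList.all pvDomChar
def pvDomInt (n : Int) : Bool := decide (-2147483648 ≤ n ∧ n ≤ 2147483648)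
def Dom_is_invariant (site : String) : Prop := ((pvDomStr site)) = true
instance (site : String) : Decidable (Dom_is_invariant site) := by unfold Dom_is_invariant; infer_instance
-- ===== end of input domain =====

-- B replaces A's anchor-and-compare two-phase loop by collecting the set of distinct
-- non-dash characters and testing its cardinality (objective: simpler).

-- ===== PORT A =====
-- the for-loop after the anchor v0 was found: early-return False on a non-dash mismatch
def isInvLoop2 (v0 : Char) : List Char → Bool
  | [] => true
  | c :: rest =>
    if c == '-' then isInvLoop2 v0 rest
    else if c != v0 then false
    else isInvLoop2 v0 rest

-- the while loop: advance until the first non-dash character v0, then run the for loop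
def isInvLoop1 : List Char → Bool
  | [] => true                      -- v0 is None: return True
  | c :: rest => if c != '-' then isInvLoop2 c rest else isInvLoop1 rest

def is_invariant (site : String) : Bool := isInvLoop1 site.toList

-- ===== PORT B =====
def is_invariant_alt (site : String) : Bool :=
  decide ((PySem.Set.ofList (site.toList.filter (fun c => c != '-'))).length ≤ 1)

-- ===== PRECONDITION & SPEC =====
def Spec_is_invariant (site : String) (out : Bool) : Prop := out = is_invariant_alt site
instance (site : String) (out : Bool) : Decidable (Spec_is_invariant site out) := by unfold Spec_is_invariant; infer_instance

-- ===== CLAIM (what is proved, stated in full; the proofs are below) =====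
def Claim_equal_is_invariant : Prop := ∀ (site : String), Dom_is_invariant site → Spec_is_invariant site (is_invariant site)

-- ===== LEMMAS AND PROOFS =====

theorem isInvLoop2_iff (v0 : Char) (l : List Char) :
    isInvLoop2 v0 l = true ↔ ∀ c ∈ l, c ≠ '-' → c = v0 := by
  induction l with
  | nil => simp [isInvLoop2]
  | cons c rest ih =>
    by_cases hd : c = '-'
    · simp [isInvLoop2, hd, ih]
    · by_cases hv : c = v0
      · simp [isInvLoop2, hd, hv, ih]
      · rw [show isInvLoop2 v0 (c :: rest) = false by simp [isInvLoop2, hd, hv]]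
        simp only [Bool.false_eq_true, false_iff]
        exact fun h => hv (h c (.head _) hd)

theorem isInvLoop1_iff (l : List Char) :
    isInvLoop1 l = true ↔ ∀ a ∈ l.filter (fun c => c != '-'), ∀ b ∈ l.filter (fun c => c != '-'), a = b := by
  induction l with
  | nil => simp [isInvLoop1]
  | cons c rest ih =>
    by_cases hd : c = '-'
    · simpa [isInvLoop1, hd] using ih
    · rw [show isInvLoop1 (c :: rest) = isInvLoop2 c rest by simp [isInvLoop1, hd],
        show (c :: rest).filter (fun c => c != '-') = c :: rest.filter (fun c => c != '-') by
          simp [List.filter_cons, hd],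
        isInvLoop2_iff]
      constructor
      · intro h a ha b hb
        have val : ∀ x, x ∈ c :: rest.filter (fun c => c != '-') → x = c := by
          intro x hx
          rcases List.mem_cons.1 hx with h1 | h1
          · exact h1
          · have := List.mem_filter.1 h1
            exact h x this.1 (by simpa using this.2)
        rw [val a ha, val b hb]
      · intro h x hx hxd
        exact h x (List.mem_cons_of_mem _ (List.mem_filter.2 ⟨hx, by simpa using hxd⟩)) c (.head _)

theorem nodup_len_le_one {α : Type} (l : List α) (h : l.Nodup) :
    l.length ≤ 1 ↔ ∀ a ∈ l, ∀ b ∈ l, a = b := by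
  match l with
  | [] => simp
  | [a] => simp
  | a :: b :: t =>
    simp only [List.length_cons]
    constructor
    · omega
    · intro hall
      have hab : a ≠ b := by
        intro e; exact (List.nodup_cons.1 h).1 (e ▸ List.mem_cons_self ..)
      exact absurd (hall a (.head _) b (.tail _ (.head _))) hab

-- ===== VERDICT (by name: the statement is the Claim_ definition above) =====
theorem is_invariant_spec : Claim_equal_is_invariant := by
  intro site _
  show is_invariant site = is_invariant_alt site
  rw [Bool.eq_iff_iff]
  unfold is_invariant is_invariant_alt
  rw [isInvLoop1_iff, decide_eq_true_iff,
    nodup_len_le_one _ (PySem.Set.nodup_ofList _)]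
  constructor
  · intro h a ha b hb
    exact h a ((PySem.Set.mem_ofList _ _).1 ha) b ((PySem.Set.mem_ofList _ _).1 hb)
  · intro h a ha b hb
    exact h a ((PySem.Set.mem_ofList _ _).2 ha) b ((PySem.Set.mem_ofList _ _).2 hb)
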